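-- pv_equiv track=rewrite | github.com/yb-kimmm/Today_I_Learn | python_basic/weeks4Quiz.py | solution
-- ===== SOURCE A (Python) =====
-- def solution(n):
--     str1 = list(str(n))
--
--     lst = [int(number) ** 2 for number in str1]
--
--     total = 0
--     for i in range(0, len(lst)):
--         total += lst[i]
--
--     k, s = divmod(total, 10)
--
--     if k in lst:
--         return False
--     lst.append(k)
--
--     if s != 1:
--         return solution(total)
--     return True
-- ===== SOURCE B (Python) =====
-- def solution(n):
--     while True:
--         sq = []
--         m = n
--         while True:
--             sq.append((m % 10) ** 2)
--             m //= 10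
--             if m == 0:
--                 break
--         total = sum(sq)
--         k, s = divmod(total, 10)
--         if k in sq:
--             return False
--         if s == 1:
--             return True
--         n = total
-- ===== Notes on version B (the rewrite author's own statement) =====
-- stated objective: alternative
-- what changed: Replaces A's string-based self-recursion with an iterative while loop that extracts digit squares arithmetically via % 10 and //= 10 (a do-while), sums them with sum() instead of an index loop, and drops A's dead lst.append(k).
import Mathlib
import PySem

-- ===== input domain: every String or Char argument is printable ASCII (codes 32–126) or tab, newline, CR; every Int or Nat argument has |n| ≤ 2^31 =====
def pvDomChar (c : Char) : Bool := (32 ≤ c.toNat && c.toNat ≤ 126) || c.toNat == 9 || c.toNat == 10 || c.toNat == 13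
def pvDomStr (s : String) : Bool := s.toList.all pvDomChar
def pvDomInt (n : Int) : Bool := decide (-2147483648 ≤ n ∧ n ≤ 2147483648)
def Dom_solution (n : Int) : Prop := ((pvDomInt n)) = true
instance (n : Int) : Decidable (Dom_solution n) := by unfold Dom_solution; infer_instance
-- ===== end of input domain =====

-- B replaces A's string-based self-recursion by a while loop that extracts the
-- digit squares arithmetically with divmod and sums them with sum(); objective: alternative.
-- Both Lean ports carry a fuel counter only as a totality guard (ample for every admitted input).

-- ===== PORT A =====
-- per-digit 'int(number) ** 2'; getD 0 is unreachable under Pre_ (digits of a nonnegative number)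
def solutionGo : Nat → Int → Bool
  | 0, _ => false
  | fuel+1, n =>
    let str1 := PySem.Int.toChars n
    let lst := str1.map (fun c => ((PySem.Int.ofChars? [c]).getD 0) ^ 2)
    let total := (PySem.List.pyRange 0 (lst.length : Int) 1).foldl
        (fun t i => t + PySem.List.pyGetD lst i 0) 0
    let k := PySem.Int.floordiv total 10
    let s := PySem.Int.mod total 10
    if lst.contains k then false
    -- 'lst.append(k)' in A is dead: lst is never read again in this call
    else if s ≠ 1 then solutionGo fuel total
    else true

def solution (n : Int) : Bool := solutionGo 1000 n

-- ===== PORT B =====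
-- the inner 'while True: sq.append((m % 10) ** 2); m //= 10; if m == 0: break'
def altDigits : Nat → Int → List Int → List Int
  | 0, _, acc => acc
  | fuel+1, m, acc =>
    let acc' := acc ++ [(PySem.Int.mod m 10) ^ 2]
    let m' := PySem.Int.floordiv m 10
    if m' = 0 then acc' else altDigits fuel m' acc'

def altGo : Nat → Int → Bool
  | 0, _ => false
  | fuel+1, n =>
    let sq := altDigits (n.natAbs + 1) n []
    let total := sq.sum
    let k := PySem.Int.floordiv total 10
    let s := PySem.Int.mod total 10
    if sq.contains k then false
    else if s = 1 then true
    else altGo fuel total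

def solution_alt (n : Int) : Bool := altGo 1000 n

-- ===== PRECONDITION & SPEC =====
-- Pre_ excludes n < 0, where A raises ValueError (int('-') on the sign character).
def Pre_solution (n : Int) : Prop := 0 ≤ n
instance (n : Int) : Decidable (Pre_solution n) := by unfold Pre_solution; infer_instance
def pvWitness_solution : Int := (19)

def Spec_solution (n : Int) (out : Bool) : Prop := out = solution_alt n
instance (n : Int) (out : Bool) : Decidable (Spec_solution n out) := by unfold Spec_solution; infer_instance

-- ===== CLAIM (what is proved, stated in full; the proofs are below) =====
def Claim_equal_solution : Prop := ∀ (n : Int), Dom_solution n → Pre_solution n → Spec_solution n (solution n)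

-- ===== LEMMAS AND PROOFS =====

-- squares of the decimal digits of m, least-significant first (do-while: one digit even for a zero input)
def rds (m : Nat) : List Int :=
  ((m % 10 : Nat) : Int) ^ 2 ::
    (if h : m / 10 = 0 then [] else rds (m / 10))
termination_by m
decreasing_by
  apply Nat.div_lt_self
  · rcases Nat.eq_zero_or_pos m with h0 | h0
    · exact absurd (by simp [h0]) h
    · exact h0
  · omega

lemma sq_digitChar (d : Nat) (hd : d < 10) :
    ((PySem.Int.ofChars? [Nat.digitChar d]).getD 0) = (d : Int) := by
  interval_cases d <;> decide

lemma altDigits_eq (f : Nat) : ∀ (m : Nat) (acc : List Int), m < 10 ^ f →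
    altDigits (f + 1) (m : Int) acc = acc ++ rds m := by
  induction f with
  | zero =>
    intro m acc hm
    have : m = 0 := by omega
    subst this
    simp [altDigits, rds]
  | succ g ih =>
    intro m acc hm
    have hmod : PySem.Int.mod (m : Int) 10 = ((m % 10 : Nat) : Int) := by
      exact_mod_cast PySem.Int.mod_natCast m 10
    have hdiv : PySem.Int.floordiv (m : Int) 10 = ((m / 10 : Nat) : Int) := by
      exact_mod_cast PySem.Int.floordiv_natCast m 10
    have hmlt : m / 10 < 10 ^ g := by rw [pow_succ] at hm; omega
    rw [altDigits]
    simp only [hmod, hdiv]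
    by_cases h0 : m / 10 = 0
    · rw [rds]
      simp [h0]
    · have hcast : ((m / 10 : Nat) : Int) ≠ 0 := by exact_mod_cast h0
      rw [if_neg hcast, ih (m / 10) _ hmlt]
      conv_rhs => rw [rds]
      simp [h0]

lemma toDigitsCore_map_sq (f : Nat) : ∀ (m : Nat) (cs : List Char), m < 10 ^ f →
    (Nat.toDigitsCore 10 (f + 1) m cs).map
        (fun c => ((PySem.Int.ofChars? [c]).getD 0) ^ 2)
      = (rds m).reverse ++ cs.map (fun c => ((PySem.Int.ofChars? [c]).getD 0) ^ 2) := by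
  induction f with
  | zero =>
    intro m cs hm
    have : m = 0 := by omega
    subst this
    rw [Nat.toDigitsCore]
    simp [rds, sq_digitChar 0 (by omega)]
  | succ g ih =>
    intro m cs hm
    have hmlt : m / 10 < 10 ^ g := by rw [pow_succ] at hm; omega
    rw [Nat.toDigitsCore]
    by_cases h0 : m / 10 = 0
    · rw [rds]
      simp [h0, sq_digitChar (m % 10) (Nat.mod_lt _ (by omega))]
    · simp only [if_neg h0]
      rw [ih (m / 10) _ hmlt]
      conv_rhs => rw [rds]
      simp [h0, sq_digitChar (m % 10) (Nat.mod_lt _ (by omega))]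

lemma lst_eq (n : Int) (hn : 0 ≤ n) :
    (PySem.Int.toChars n).map (fun c => ((PySem.Int.ofChars? [c]).getD 0) ^ 2)
      = (rds n.toNat).reverse := by
  rw [PySem.Int.toChars, if_neg (by omega), Nat.toDigits]
  rw [toDigitsCore_map_sq n.toNat n.toNat [] (lt_of_lt_of_le (Nat.lt_pow_self (by omega))
    (Nat.pow_le_pow_right (by omega) (by omega)))]
  simp

lemma rds_nonneg (m : Nat) : ∀ x ∈ rds m, 0 ≤ x := by
  induction m using rds.induct with
  | _ m ih =>
    rw [rds]
    intro x hx
    rcases List.mem_cons.mp hx with h | h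
    · subst h; positivity
    · by_cases h0 : m / 10 = 0
      · simp [h0] at h
      · rw [dif_neg h0] at h
        exact ih h0 x h

lemma go_eq (fuel : Nat) : ∀ (n : Int), 0 ≤ n → solutionGo fuel n = altGo fuel n := by
  induction fuel with
  | zero => intro n _; rfl
  | succ f ih =>
    intro n hn
    obtain ⟨m, rfl⟩ : ∃ m : Nat, n = (m : Int) := ⟨n.toNat, (Int.toNat_of_nonneg hn).symm⟩
    rw [solutionGo, altGo]
    have hpow : m < 10 ^ m := Nat.lt_pow_self (by omega)
    have hl : (PySem.Int.toChars (m : Int)).map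
        (fun c => ((PySem.Int.ofChars? [c]).getD 0) ^ 2) = (rds m).reverse := by
      have := lst_eq (m : Int) (by positivity)
      simpa using this
    have hd : altDigits ((m : Int).natAbs + 1) (m : Int) [] = rds m := by
      rw [Int.natAbs_natCast,
        altDigits_eq m m [] (lt_of_lt_of_le hpow (Nat.pow_le_pow_right (by omega) (by omega)))]
      simp
    rw [hl, hd,
      PySem.List.foldl_pyRange_zero_pyGetD' (rds m).reverse 0 (· + ·) 0,
      ← List.sum_eq_foldl, List.sum_reverse]
    have htot : 0 ≤ (rds m).sum := List.sum_nonneg (rds_nonneg m)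
    simp [ih _ htot]

-- ===== VERDICT (by name: the statement is the Claim_ definition above) =====
theorem solution_spec : Claim_equal_solution := by
  intro n _ hpre
  unfold Spec_solution solution solution_alt
  exact go_eq 1000 n hpre
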